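-- pv_equiv track=rewrite | github.com/KevinZiadeh/AUB_Scheduler | courses_list_model.py | or_confusion_resolution
-- ===== SOURCE A (Python) =====
-- def or_confusion_resolution(list_search):
--     NL = []
--     index = []
--     for i in range (len(list_search)):
--         if len(list_search[i])>8:
--             index.append(i)
--             NL.extend(list_search[i].split("|"))
--
--     for i in range(len(index)-1, -1, -1):
--         del list_search[index[i]]
--     list_search.extend(NL)
--     return list_search
-- ===== SOURCE B (Python) =====
-- def or_confusion_resolution(list_search):
--     kept = [x for x in list_search if len(x) <= 8]
--     splits = []
--     for x in list_search:
--         if len(x) > 8: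
--             splits.extend(x.split("|"))
--     list_search[:] = kept + splits
--     return list_search
-- ===== Notes on version B (the rewrite author's own statement) =====
-- stated objective: simpler
-- what changed: Replaced the index-collecting loop plus reverse del-by-index loop with a single partition (order-preserving filter of short entries, one pass collecting splits of long entries) and a slice assignment rebuilding the list.
import Mathlib
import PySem

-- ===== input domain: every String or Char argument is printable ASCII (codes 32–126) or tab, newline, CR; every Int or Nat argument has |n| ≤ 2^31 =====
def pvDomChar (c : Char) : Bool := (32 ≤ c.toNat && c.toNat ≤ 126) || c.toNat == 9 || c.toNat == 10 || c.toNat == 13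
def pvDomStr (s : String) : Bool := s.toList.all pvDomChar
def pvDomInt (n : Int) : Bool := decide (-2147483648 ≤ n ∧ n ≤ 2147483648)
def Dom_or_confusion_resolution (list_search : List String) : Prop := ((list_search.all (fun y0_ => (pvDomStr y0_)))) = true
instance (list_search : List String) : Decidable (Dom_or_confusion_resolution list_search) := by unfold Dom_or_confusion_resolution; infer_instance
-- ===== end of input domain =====

-- B rebuilds the list in one partition pass (kept short entries + collected splits) instead of
-- collecting indices and deleting them in reverse; objective: simpler (return value equivalence;
-- both Pythons mutate the argument list in place to the same final contents).

-- ===== PORT A =====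
def or_confusion_resolution (list_search : List String) : List String :=
  -- first loop: for i in range(len(list_search)): collect NL (splits) and index
  let st := (List.range list_search.length).foldl
    (fun (st : List String × List Nat) i =>
      let s := list_search.getD i ""
      if PySem.Str.len s > 8 then (st.1 ++ (PySem.Str.split? s "|").getD [], st.2 ++ [i]) else st)
    ([], [])
  -- second loop: for i in range(len(index)-1, -1, -1): del list_search[index[i]]
  let ls := st.2.reverse.foldl (fun l i => l.eraseIdx i) list_search
  ls ++ st.1

-- ===== PORT B =====
def or_confusion_resolution_alt (list_search : List String) : List String :=
  let kept := list_search.filter (fun x => PySem.Str.len x ≤ 8)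
  let splits := list_search.foldl
    (fun acc x => if PySem.Str.len x > 8 then acc ++ (PySem.Str.split? x "|").getD [] else acc) []
  kept ++ splits

-- ===== PRECONDITION & SPEC =====
def Spec_or_confusion_resolution (list_search : List String) (out : List String) : Prop := out = or_confusion_resolution_alt list_search
instance (list_search : List String) (out : List String) : Decidable (Spec_or_confusion_resolution list_search out) := by unfold Spec_or_confusion_resolution; infer_instance

-- ===== CLAIM (what is proved, stated in full; the proofs are below) =====
def Claim_equal_or_confusion_resolution : Prop := ∀ (list_search : List String), Dom_or_confusion_resolution list_search → Spec_or_confusion_resolution list_search (or_confusion_resolution list_search)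

-- ===== LEMMAS AND PROOFS =====

-- proof-only abbreviations
def pvP (x : String) : Bool := PySem.Str.len x > 8
def pvSplit (x : String) : List String := (PySem.Str.split? x "|").getD []
-- splits of the long entries, in order
def pvNl (xs : List String) : List String := (xs.filter pvP).flatMap pvSplit
-- the indices A's first loop stores
def pvIdxs (xs : List String) : List Nat :=
  (List.range xs.length).filter (fun i => pvP (xs.getD i ""))

lemma pvIdxs_cons (x : String) (xs : List String) :
    pvIdxs (x :: xs) = (if pvP x then [0] else []) ++ (pvIdxs xs).map (· + 1) := by
  unfold pvIdxs
  rw [show (x :: xs).length = xs.length + 1 from rfl, List.range_succ_eq_map]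
  simp only [List.filter_cons, List.filter_map, List.getD_cons_zero, List.getD_cons_succ,
    Function.comp_def, Nat.succ_eq_add_one]
  split <;> simp

lemma pvNl_cons (x : String) (xs : List String) :
    pvNl (x :: xs) = (if pvP x then pvSplit x else []) ++ pvNl xs := by
  unfold pvNl
  rw [List.filter_cons]
  split <;> simp

-- characterization of A's first loop, generalized over an index-relabelling g
lemma pvFoldA (xs : List String) : ∀ (g : Nat → Nat) (aN : List String) (aI : List Nat),
    (List.range xs.length).foldl
      (fun (st : List String × List Nat) i =>
        let s := xs.getD i ""
        if PySem.Str.len s > 8 then (st.1 ++ (PySem.Str.split? s "|").getD [], st.2 ++ [g i]) else st)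
      (aN, aI)
    = (aN ++ pvNl xs, aI ++ (pvIdxs xs).map g) := by
  induction xs with
  | nil => intro g aN aI; simp [pvNl, pvIdxs]
  | cons x xs ih =>
    intro g aN aI
    rw [show (x :: xs).length = xs.length + 1 from rfl, List.range_succ_eq_map,
        List.foldl_cons, List.foldl_map]
    simp only [List.getD_cons_succ, List.getD_cons_zero]
    rw [pvIdxs_cons, pvNl_cons, List.map_append, List.map_map]
    by_cases h : pvP x
    · have h' : PySem.Str.len x > 8 := by simpa [pvP] using h
      rw [if_pos h']
      simp only [h, if_pos]
      rw [ih (fun i => g (i + 1))]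
      simp [Function.comp_def, pvSplit]
    · have h' : ¬ PySem.Str.len x > 8 := by simpa [pvP] using h
      rw [if_neg h']
      simp only [h, if_neg, Bool.false_eq_true, not_false_iff]
      rw [ih (fun i => g (i + 1))]
      simp [Function.comp_def]

-- deleting at shifted indices leaves the head alone
lemma pvEraseShift (l : List Nat) : ∀ (x : String) (ys : List String),
    (l.map (· + 1)).foldl (fun a i => a.eraseIdx i) (x :: ys)
    = x :: l.foldl (fun a i => a.eraseIdx i) ys := by
  induction l with
  | nil => intro x ys; rfl
  | cons j l ih => intro x ys; simp only [List.map_cons, List.foldl_cons, List.eraseIdx_cons_succ]; exact ih x _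

-- A's reverse-deletion loop removes exactly the long entries
lemma pvDelete (xs : List String) :
    (pvIdxs xs).reverse.foldl (fun l i => l.eraseIdx i) xs
    = xs.filter (fun x => !pvP x) := by
  induction xs with
  | nil => simp [pvIdxs]
  | cons x xs ih =>
    rw [pvIdxs_cons, List.reverse_append, List.foldl_append, ← List.map_reverse, pvEraseShift, ih]
    by_cases h : pvP x
    · simp [h]
    · simp [h]

-- characterization of B's splits loop
lemma pvFoldB (xs : List String) : ∀ (acc : List String),
    xs.foldl (fun acc x => if PySem.Str.len x > 8 then acc ++ (PySem.Str.split? x "|").getD [] else acc) acc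
    = acc ++ pvNl xs := by
  induction xs with
  | nil => intro acc; simp [pvNl]
  | cons x xs ih =>
    intro acc
    rw [List.foldl_cons, pvNl_cons]
    by_cases h : PySem.Str.len x > 8
    · have hh : pvP x = true := by unfold pvP; exact decide_eq_true h
      rw [if_pos h, ih]; simp [hh, pvSplit]
    · have hh : pvP x = false := by unfold pvP; exact decide_eq_false h
      rw [if_neg h, ih]; simp [hh]

-- ===== VERDICT (by name: the statement is the Claim_ definition above) =====
theorem or_confusion_resolution_spec : Claim_equal_or_confusion_resolution := by
  intro xs _
  show or_confusion_resolution xs = or_confusion_resolution_alt xs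
  unfold or_confusion_resolution or_confusion_resolution_alt
  have hA := pvFoldA xs id [] []
  simp only [id_eq] at hA
  simp only [or_confusion_resolution]
  simp only [hA, List.map_id, List.nil_append, pvFoldB, pvDelete]
  congr 1
  apply List.filter_congr
  intro x _
  simp [pvP, ← decide_not]
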